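-- pv_equiv track=rewrite | github.com/tjusummers/playplay | Addition_and_Subtraction_Practice.py | _borrow_count_sub
-- ===== SOURCE A (Python) =====
-- def _borrow_count_sub(a: int, b: int) -> int:
--     # assumes a >= b and both 3-digit
--     cnt = 0
--     borrow = 0
--     for _ in range(3):
--         da = a % 10 - borrow
--         db = b % 10
--         if da < db:
--             cnt += 1
--             borrow = 1
--         else:
--             borrow = 0
--         a //= 10
--         b //= 10
--     return cnt
-- ===== SOURCE B (Python) =====
-- def _borrow_count_sub(a: int, b: int) -> int:
--     # A borrow occurs out of digit position i exactly when the low (i+1)-digit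
--     # suffix of a is smaller than that of b; no borrow state is threaded.
--     return sum(1 for i in range(3) if a % 10 ** (i + 1) < b % 10 ** (i + 1))
-- ===== Notes on version B (the rewrite author's own statement) =====
-- stated objective: alternative
-- what changed: Replaced the sequential loop threading a mutable borrow flag through the digits with a stateless closed-form count: position i borrows iff a % 10**(i+1) < b % 10**(i+1), summed over the three positions.
import Mathlib
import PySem

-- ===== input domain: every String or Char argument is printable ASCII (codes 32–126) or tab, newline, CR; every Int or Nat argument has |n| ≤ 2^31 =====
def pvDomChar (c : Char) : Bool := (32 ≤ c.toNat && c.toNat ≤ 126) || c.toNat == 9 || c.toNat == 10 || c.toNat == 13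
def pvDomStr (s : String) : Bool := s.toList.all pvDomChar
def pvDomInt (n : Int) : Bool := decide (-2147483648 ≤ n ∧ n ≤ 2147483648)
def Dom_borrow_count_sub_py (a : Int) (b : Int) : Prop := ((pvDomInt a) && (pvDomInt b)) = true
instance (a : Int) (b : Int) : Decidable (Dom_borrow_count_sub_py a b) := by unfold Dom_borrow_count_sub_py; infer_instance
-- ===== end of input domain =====

-- B replaces A's borrow-threading loop by a stateless count of positions i where
-- a % 10^(i+1) < b % 10^(i+1); same result, different decomposition (objective: alternative).


-- ===== PORT A =====
-- literal port: fold over range(3) threading state (cnt, borrow, a, b)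
def borrow_count_sub_py (a : Int) (b : Int) : Int :=
  ((PySem.List.pyRange 0 3 1).foldl
    (fun (st : Int × Int × Int × Int) _ =>
      let cnt := st.1
      let borrow := st.2.1
      let a := st.2.2.1
      let b := st.2.2.2
      let da := PySem.Int.mod a 10 - borrow
      let db := PySem.Int.mod b 10
      let cb : Int × Int := if da < db then (cnt + 1, 1) else (cnt, 0)
      (cb.1, cb.2, PySem.Int.floordiv a 10, PySem.Int.floordiv b 10))
    (0, 0, a, b)).1

-- ===== PORT B =====
-- literal port of Source B: sum over i in range(3) of the suffix comparison
def borrow_count_sub_py_alt (a : Int) (b : Int) : Int :=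
  ((PySem.List.pyRange 0 3 1).map
    (fun i => if PySem.Int.mod a ((10:Int) ^ (i + 1).toNat) < PySem.Int.mod b ((10:Int) ^ (i + 1).toNat)
              then (1:Int) else 0)).sum

-- ===== PRECONDITION & SPEC =====
def Spec_borrow_count_sub_py (a : Int) (b : Int) (out : Int) : Prop := out = borrow_count_sub_py_alt a b
instance (a : Int) (b : Int) (out : Int) : Decidable (Spec_borrow_count_sub_py a b out) := by unfold Spec_borrow_count_sub_py; infer_instance

-- ===== CLAIM (what is proved, stated in full; the proofs are below) =====
def Claim_equal_borrow_count_sub_py : Prop := ∀ (a : Int) (b : Int), Dom_borrow_count_sub_py a b → Spec_borrow_count_sub_py a b (borrow_count_sub_py a b)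

-- ===== LEMMAS AND PROOFS =====
theorem pv_mod10 (x : Int) : PySem.Int.mod x 10 = x % 10 :=
  PySem.Int.mod_eq_emod_of_pos (by norm_num)
theorem pv_mod100 (x : Int) : PySem.Int.mod x 100 = x % 100 :=
  PySem.Int.mod_eq_emod_of_pos (by norm_num)
theorem pv_mod1000 (x : Int) : PySem.Int.mod x 1000 = x % 1000 :=
  PySem.Int.mod_eq_emod_of_pos (by norm_num)
theorem pv_fdiv10 (x : Int) : PySem.Int.floordiv x 10 = x / 10 :=
  PySem.Int.floordiv_eq_ediv_of_pos (by norm_num)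

theorem pv_range3 : PySem.List.pyRange 0 3 1 = [0, 1, 2] := by decide

-- ===== VERDICT (by name: the statement is the Claim_ definition above) =====
theorem borrow_count_sub_py_spec : Claim_equal_borrow_count_sub_py := by
  intro a b _
  show borrow_count_sub_py a b = borrow_count_sub_py_alt a b
  simp only [borrow_count_sub_py, borrow_count_sub_py_alt, pv_range3,
    List.foldl_cons, List.foldl_nil, List.map_cons, List.map_nil, List.sum_cons,
    List.sum_nil]
  norm_num [pv_mod10, pv_mod100, pv_mod1000, pv_fdiv10]
  simp only [show ((10:Int) ^ Int.toNat 2) = 100 from by decide,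
    show ((10:Int) ^ Int.toNat 3) = 1000 from by decide]
  have hda : a / 10 / 10 = a / 100 := by
    rw [Int.ediv_ediv_of_nonneg (by norm_num : (0:Int) ≤ 10)]; norm_num
  have hdb : b / 10 / 10 = b / 100 := by
    rw [Int.ediv_ediv_of_nonneg (by norm_num : (0:Int) ≤ 10)]; norm_num
  have hda3 : a / 100 / 10 = a / 1000 := by
    rw [Int.ediv_ediv_of_nonneg (by norm_num : (0:Int) ≤ 100)]; norm_num
  have hdb3 : b / 100 / 10 = b / 1000 := by
    rw [Int.ediv_ediv_of_nonneg (by norm_num : (0:Int) ≤ 100)]; norm_num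
  simp only [hda, hdb]
  split_ifs <;> omega
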